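-- pv_equiv track=rewrite | github.com/jnaurot/aiproj | backend/app/routes/runs.py | _normalize_duckdb_type
-- ===== SOURCE A (Python) =====
-- def _normalize_duckdb_type(native_type: str) -> str:
--     t = str(native_type or "").upper()
--     if "BOOL" in t:
--         return "bool"
--     if any(x in t for x in ("TINYINT", "SMALLINT", "INTEGER", "BIGINT", "HUGEINT", "UBIGINT", "UINTEGER", "USMALLINT", "UTINYINT")):
--         return "int"
--     if any(x in t for x in ("FLOAT", "DOUBLE", "REAL", "DECIMAL", "NUMERIC")):
--         return "float"
--     if any(x in t for x in ("DATE", "TIME", "TIMESTAMP", "INTERVAL")):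
--         return "date"
--     if any(x in t for x in ("JSON",)):
--         return "json"
--     if any(x in t for x in ("BLOB", "BYTEA", "BINARY", "VARBINARY")):
--         return "binary"
--     if any(x in t for x in ("CHAR", "TEXT", "VARCHAR", "UUID")):
--         return "string"
--     return "unknown"
-- ===== SOURCE B (Python) =====
-- _CATEGORIES = ["bool", "int", "float", "date", "json", "binary", "string", "unknown"]
-- _KEYWORDS = [
--     ("BOOL", 0),
--     ("TINYINT", 1), ("SMALLINT", 1), ("INTEGER", 1), ("BIGINT", 1), ("HUGEINT", 1),
--     ("UBIGINT", 1), ("UINTEGER", 1), ("USMALLINT", 1), ("UTINYINT", 1),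
--     ("FLOAT", 2), ("DOUBLE", 2), ("REAL", 2), ("DECIMAL", 2), ("NUMERIC", 2),
--     ("DATE", 3), ("TIME", 3), ("TIMESTAMP", 3), ("INTERVAL", 3),
--     ("JSON", 4),
--     ("BLOB", 5), ("BYTEA", 5), ("BINARY", 5), ("VARBINARY", 5),
--     ("CHAR", 6), ("TEXT", 6), ("VARCHAR", 6), ("UUID", 6),
-- ]
--
-- def _normalize_duckdb_type(native_type: str) -> str:
--     # Single left-to-right scan over the input: at each offset, check which
--     # keywords start there and keep the minimum category priority seen.
--     t = str(native_type or "").upper()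
--     best = 7
--     for i in range(len(t)):
--         for kw, p in _KEYWORDS:
--             if p < best and t.startswith(kw, i):
--                 best = p
--     return _CATEGORIES[best]
-- ===== Notes on version B (the rewrite author's own statement) =====
-- stated objective: alternative
-- what changed: Replaces the per-category substring-membership if-chain by a single left-to-right scan of the input that checks at each offset which keywords start there and keeps the minimum category priority, indexing a category table at the end.
import Mathlib
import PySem

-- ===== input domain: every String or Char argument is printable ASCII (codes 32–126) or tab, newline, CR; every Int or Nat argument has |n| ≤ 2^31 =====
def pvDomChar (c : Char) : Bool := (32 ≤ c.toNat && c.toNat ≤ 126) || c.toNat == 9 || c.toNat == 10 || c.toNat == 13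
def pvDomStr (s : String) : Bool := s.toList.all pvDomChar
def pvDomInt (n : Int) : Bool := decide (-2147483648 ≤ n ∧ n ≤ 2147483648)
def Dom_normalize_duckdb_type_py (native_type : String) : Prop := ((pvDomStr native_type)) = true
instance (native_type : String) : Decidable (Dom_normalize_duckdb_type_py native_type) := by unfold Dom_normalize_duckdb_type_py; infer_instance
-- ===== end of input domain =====

-- B replaces A's per-category substring-membership if-chain by a single left-to-right scan over
-- the input's offsets keeping the minimum matched category priority; same result, no speed claim.

-- ===== PORT A =====
-- 't = str(native_type or "").upper()': native_type is a str; 'or ""' maps "" to "" and str()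
-- is the identity on str, so t = native_type.upper() exactly.
def normalize_duckdb_type_py (native_type : String) : String :=
  let t := PySem.Str.upper native_type
  if PySem.Str.isIn "BOOL" t then "bool"
  else if ["TINYINT", "SMALLINT", "INTEGER", "BIGINT", "HUGEINT", "UBIGINT", "UINTEGER", "USMALLINT", "UTINYINT"].any (fun x => PySem.Str.isIn x t) then "int"
  else if ["FLOAT", "DOUBLE", "REAL", "DECIMAL", "NUMERIC"].any (fun x => PySem.Str.isIn x t) then "float"
  else if ["DATE", "TIME", "TIMESTAMP", "INTERVAL"].any (fun x => PySem.Str.isIn x t) then "date"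
  else if ["JSON"].any (fun x => PySem.Str.isIn x t) then "json"
  else if ["BLOB", "BYTEA", "BINARY", "VARBINARY"].any (fun x => PySem.Str.isIn x t) then "binary"
  else if ["CHAR", "TEXT", "VARCHAR", "UUID"].any (fun x => PySem.Str.isIn x t) then "string"
  else "unknown"

-- ===== PORT B =====
def pvCategories : List String :=
  ["bool", "int", "float", "date", "json", "binary", "string", "unknown"]

def pvKeywords : List (List Char × Nat) :=
  [("BOOL".toList, 0),
   ("TINYINT".toList, 1), ("SMALLINT".toList, 1), ("INTEGER".toList, 1), ("BIGINT".toList, 1), ("HUGEINT".toList, 1),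
   ("UBIGINT".toList, 1), ("UINTEGER".toList, 1), ("USMALLINT".toList, 1), ("UTINYINT".toList, 1),
   ("FLOAT".toList, 2), ("DOUBLE".toList, 2), ("REAL".toList, 2), ("DECIMAL".toList, 2), ("NUMERIC".toList, 2),
   ("DATE".toList, 3), ("TIME".toList, 3), ("TIMESTAMP".toList, 3), ("INTERVAL".toList, 3),
   ("JSON".toList, 4),
   ("BLOB".toList, 5), ("BYTEA".toList, 5), ("BINARY".toList, 5), ("VARBINARY".toList, 5),
   ("CHAR".toList, 6), ("TEXT".toList, 6), ("VARCHAR".toList, 6), ("UUID".toList, 6)]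

-- Source B: 'for i in range(len(t)): for kw, p in _KEYWORDS: if p < best and t.startswith(kw, i): best = p';
-- t.startswith(kw, i) for 0 ≤ i is exactly 'kw is a prefix of t[i:]' (PySem.Chars.startswith on the drop).
-- best ≤ 7 always (proved below), so '_CATEGORIES[best]' never raises; getD's default is unreachable.
def normalize_duckdb_type_py_alt (native_type : String) : String :=
  let t := (PySem.Str.upper native_type).toList
  let best := (List.range t.length).foldl
    (fun best i => pvKeywords.foldl
      (fun b kp => if kp.2 < b && PySem.Chars.startswith (t.drop i) kp.1 then kp.2 else b) best) 7
  pvCategories.getD best "unknown"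

-- ===== PRECONDITION & SPEC =====
def Spec_normalize_duckdb_type_py (native_type : String) (out : String) : Prop := out = normalize_duckdb_type_py_alt native_type
instance (native_type : String) (out : String) : Decidable (Spec_normalize_duckdb_type_py native_type out) := by unfold Spec_normalize_duckdb_type_py; infer_instance

-- ===== CLAIM (what is proved, stated in full; the proofs are below) =====
def Claim_equal_normalize_duckdb_type_py : Prop := ∀ (native_type : String), Dom_normalize_duckdb_type_py native_type → Spec_normalize_duckdb_type_py native_type (normalize_duckdb_type_py native_type)

-- ===== LEMMAS AND PROOFS =====

-- does keyword kp.1 start at offset i of t?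
def pvStartsAt (t : List Char) (i : Nat) (kp : List Char × Nat) : Bool :=
  PySem.Chars.startswith (t.drop i) kp.1

-- the multiset of priorities of all (offset, keyword) matches in t
def pvL (t : List Char) : List Nat :=
  (List.range t.length).flatMap (fun i => ((pvKeywords.filter (pvStartsAt t i)).map (·.2)))

theorem pvStep_eq (t : List Char) (i : Nat) :
    (fun (b : Nat) (kp : List Char × Nat) =>
        if kp.2 < b && PySem.Chars.startswith (t.drop i) kp.1 then kp.2 else b)
    = (fun b kp => if pvStartsAt t i kp then min b kp.2 else b) := by
  funext b kp
  simp only [pvStartsAt]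
  by_cases h : PySem.Chars.startswith (t.drop i) kp.1 = true
  · simp only [h, Bool.and_true]
    by_cases h2 : kp.2 < b <;> simp [h2, Nat.min_def]
  · simp [h]

theorem pv_foldl_if_min {α : Type} (m : α → Bool) (f : α → Nat) :
    ∀ (xs : List α) (b : Nat),
      xs.foldl (fun b x => if m x then min b (f x) else b) b
        = ((xs.filter m).map f).foldl min b := by
  intro xs
  induction xs with
  | nil => intro b; rfl
  | cons x xs ih =>
      intro b
      by_cases h : m x = true <;> simp [h, ih]

theorem pv_foldl_foldl_min {α : Type} (L : α → List Nat) :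
    ∀ (xs : List α) (b : Nat),
      xs.foldl (fun b i => ((L i).foldl min b)) b = (xs.flatMap L).foldl min b := by
  intro xs
  induction xs with
  | nil => intro b; rfl
  | cons x xs ih => intro b; simp [List.flatMap_cons, List.foldl_append, ih]

theorem pv_foldl_min_le_init : ∀ (l : List Nat) (b : Nat), l.foldl min b ≤ b := by
  intro l
  induction l with
  | nil => intro b; exact le_rfl
  | cons x l ih =>
      intro b
      exact le_trans (ih (min b x)) (min_le_left _ _)

theorem pv_foldl_min_le_mem : ∀ (l : List Nat) (b x : Nat), x ∈ l → l.foldl min b ≤ x := by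
  intro l
  induction l with
  | nil => intro b x hx; cases hx
  | cons z l ih =>
      intro b x hx
      rcases List.mem_cons.mp hx with h | h
      · have h1 : (z :: l).foldl min b = l.foldl min (min b z) := rfl
        rw [h1, h]
        exact le_trans (pv_foldl_min_le_init l (min b z)) (h ▸ min_le_right _ _)
      · exact ih (min b z) x h

theorem pv_foldl_min_mem : ∀ (l : List Nat) (b : Nat), l.foldl min b = b ∨ l.foldl min b ∈ l := by
  intro l
  induction l with
  | nil => intro b; exact Or.inl rfl
  | cons x l ih =>
      intro b
      have h1 : (x :: l).foldl min b = l.foldl min (min b x) := rfl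
      rcases ih (min b x) with h | h
      · rcases Nat.le_total b x with hbx | hxb
        · left; rw [h1, h]; omega
        · right; rw [h1, h]
          have : min b x = x := by omega
          rw [this]; exact List.mem_cons_self
      · right; rw [h1]; exact List.mem_cons_of_mem _ h

theorem pv_exists_lt_startswith_iff (kw t : List Char) (h : kw ≠ []) :
    (∃ i, i < t.length ∧ PySem.Chars.startswith (t.drop i) kw = true)
      ↔ PySem.Chars.isIn kw t = true := by
  rw [← PySem.Chars.exists_prefix_drop_iff_isIn]
  constructor
  · rintro ⟨i, _, hs⟩
    exact ⟨i, (PySem.Chars.startswith_iff _ _).1 hs⟩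
  · rintro ⟨j, hp⟩
    by_cases hj : j < t.length
    · exact ⟨j, hj, (PySem.Chars.startswith_iff _ _).2 hp⟩
    · exfalso
      have hd : t.drop j = [] := List.drop_eq_nil_of_le (by omega)
      rw [hd] at hp
      exact h (List.prefix_nil.mp hp)

theorem pv_mem_pvL_iff (t : List Char) (q : Nat) :
    q ∈ pvL t ↔ ∃ kp, kp ∈ pvKeywords ∧ kp.2 = q ∧ PySem.Chars.isIn kp.1 t = true := by
  have hne : ∀ kp, kp ∈ pvKeywords → (kp.1 : List Char) ≠ [] := by decide
  simp only [pvL, List.mem_flatMap, List.mem_range, List.mem_map, List.mem_filter, pvStartsAt]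
  constructor
  · rintro ⟨i, hi, kp, ⟨hkp, hsw⟩, hq⟩
    exact ⟨kp, hkp, hq, (pv_exists_lt_startswith_iff kp.1 t (hne kp hkp)).1 ⟨i, hi, hsw⟩⟩
  · rintro ⟨kp, hkp, hq, hin⟩
    obtain ⟨i, hi, hsw⟩ := (pv_exists_lt_startswith_iff kp.1 t (hne kp hkp)).2 hin
    exact ⟨i, hi, kp, ⟨hkp, hsw⟩, hq⟩

theorem pv_mem_lt (t : List Char) (q : Nat) (h : q ∈ pvL t) : q < 7 := by
  obtain ⟨kp, hkp, hq, -⟩ := (pv_mem_pvL_iff t q).1 h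
  have h7 : kp.2 < 7 := by
    have : ∀ kp, kp ∈ pvKeywords → kp.2 < 7 := by decide
    exact this kp hkp
  omega

theorem pv_alt_eq (s : String) :
    normalize_duckdb_type_py_alt s
      = pvCategories.getD ((pvL (PySem.Str.upper s).toList).foldl min 7) "unknown" := by
  unfold normalize_duckdb_type_py_alt
  simp only [pvStep_eq, pv_foldl_if_min, pv_foldl_foldl_min, pvL]

theorem pv_mem0 (t : List Char) :
    0 ∈ pvL t ↔ PySem.Chars.isIn "BOOL".toList t = true := by
  rw [pv_mem_pvL_iff]; simp [pvKeywords]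

theorem pv_mem1 (t : List Char) :
    1 ∈ pvL t ↔ (PySem.Chars.isIn "TINYINT".toList t = true ∨ PySem.Chars.isIn "SMALLINT".toList t = true ∨ PySem.Chars.isIn "INTEGER".toList t = true ∨ PySem.Chars.isIn "BIGINT".toList t = true ∨ PySem.Chars.isIn "HUGEINT".toList t = true ∨ PySem.Chars.isIn "UBIGINT".toList t = true ∨ PySem.Chars.isIn "UINTEGER".toList t = true ∨ PySem.Chars.isIn "USMALLINT".toList t = true ∨ PySem.Chars.isIn "UTINYINT".toList t = true) := by
  rw [pv_mem_pvL_iff]; simp [pvKeywords]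

theorem pv_mem2 (t : List Char) :
    2 ∈ pvL t ↔ (PySem.Chars.isIn "FLOAT".toList t = true ∨ PySem.Chars.isIn "DOUBLE".toList t = true ∨ PySem.Chars.isIn "REAL".toList t = true ∨ PySem.Chars.isIn "DECIMAL".toList t = true ∨ PySem.Chars.isIn "NUMERIC".toList t = true) := by
  rw [pv_mem_pvL_iff]; simp [pvKeywords]

theorem pv_mem3 (t : List Char) :
    3 ∈ pvL t ↔ (PySem.Chars.isIn "DATE".toList t = true ∨ PySem.Chars.isIn "TIME".toList t = true ∨ PySem.Chars.isIn "TIMESTAMP".toList t = true ∨ PySem.Chars.isIn "INTERVAL".toList t = true) := by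
  rw [pv_mem_pvL_iff]; simp [pvKeywords]

theorem pv_mem4 (t : List Char) :
    4 ∈ pvL t ↔ PySem.Chars.isIn "JSON".toList t = true := by
  rw [pv_mem_pvL_iff]; simp [pvKeywords]

theorem pv_mem5 (t : List Char) :
    5 ∈ pvL t ↔ (PySem.Chars.isIn "BLOB".toList t = true ∨ PySem.Chars.isIn "BYTEA".toList t = true ∨ PySem.Chars.isIn "BINARY".toList t = true ∨ PySem.Chars.isIn "VARBINARY".toList t = true) := by
  rw [pv_mem_pvL_iff]; simp [pvKeywords]

theorem pv_mem6 (t : List Char) :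
    6 ∈ pvL t ↔ (PySem.Chars.isIn "CHAR".toList t = true ∨ PySem.Chars.isIn "TEXT".toList t = true ∨ PySem.Chars.isIn "VARCHAR".toList t = true ∨ PySem.Chars.isIn "UUID".toList t = true) := by
  rw [pv_mem_pvL_iff]; simp [pvKeywords]

-- ===== VERDICT (by name: the statement is the Claim_ definition above) =====
theorem normalize_duckdb_type_py_spec : Claim_equal_normalize_duckdb_type_py := by
  intro s _
  unfold Spec_normalize_duckdb_type_py
  rw [pv_alt_eq]
  set t := PySem.Str.upper s with ht
  set tl := t.toList with htl
  set r := (pvL tl).foldl min 7 with hr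
  have hmemor := pv_foldl_min_mem (pvL tl) 7
  rw [← hr] at hmemor
  have hA : r ∈ pvL tl → r < 7 := pv_mem_lt tl r
  unfold normalize_duckdb_type_py
  rw [← ht]
  -- the seven boolean conditions of A, as the propositional disjunctions used by the pv_mem lemmas
  have e0 : PySem.Str.isIn "BOOL" t = true ↔ PySem.Chars.isIn "BOOL".toList tl = true := by simp [htl]
  have e1 : (["TINYINT", "SMALLINT", "INTEGER", "BIGINT", "HUGEINT", "UBIGINT", "UINTEGER", "USMALLINT", "UTINYINT"].any (fun x => PySem.Str.isIn x t)) = true ↔ (PySem.Chars.isIn "TINYINT".toList tl = true ∨ PySem.Chars.isIn "SMALLINT".toList tl = true ∨ PySem.Chars.isIn "INTEGER".toList tl = true ∨ PySem.Chars.isIn "BIGINT".toList tl = true ∨ PySem.Chars.isIn "HUGEINT".toList tl = true ∨ PySem.Chars.isIn "UBIGINT".toList tl = true ∨ PySem.Chars.isIn "UINTEGER".toList tl = true ∨ PySem.Chars.isIn "USMALLINT".toList tl = true ∨ PySem.Chars.isIn "UTINYINT".toList tl = true) := by simp [htl]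
  have e2 : (["FLOAT", "DOUBLE", "REAL", "DECIMAL", "NUMERIC"].any (fun x => PySem.Str.isIn x t)) = true ↔ (PySem.Chars.isIn "FLOAT".toList tl = true ∨ PySem.Chars.isIn "DOUBLE".toList tl = true ∨ PySem.Chars.isIn "REAL".toList tl = true ∨ PySem.Chars.isIn "DECIMAL".toList tl = true ∨ PySem.Chars.isIn "NUMERIC".toList tl = true) := by simp [htl]
  have e3 : (["DATE", "TIME", "TIMESTAMP", "INTERVAL"].any (fun x => PySem.Str.isIn x t)) = true ↔ (PySem.Chars.isIn "DATE".toList tl = true ∨ PySem.Chars.isIn "TIME".toList tl = true ∨ PySem.Chars.isIn "TIMESTAMP".toList tl = true ∨ PySem.Chars.isIn "INTERVAL".toList tl = true) := by simp [htl]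
  have e4 : (["JSON"].any (fun x => PySem.Str.isIn x t)) = true ↔ PySem.Chars.isIn "JSON".toList tl = true := by simp [htl]
  have e5 : (["BLOB", "BYTEA", "BINARY", "VARBINARY"].any (fun x => PySem.Str.isIn x t)) = true ↔ (PySem.Chars.isIn "BLOB".toList tl = true ∨ PySem.Chars.isIn "BYTEA".toList tl = true ∨ PySem.Chars.isIn "BINARY".toList tl = true ∨ PySem.Chars.isIn "VARBINARY".toList tl = true) := by simp [htl]
  have e6 : (["CHAR", "TEXT", "VARCHAR", "UUID"].any (fun x => PySem.Str.isIn x t)) = true ↔ (PySem.Chars.isIn "CHAR".toList tl = true ∨ PySem.Chars.isIn "TEXT".toList tl = true ∨ PySem.Chars.isIn "VARCHAR".toList tl = true ∨ PySem.Chars.isIn "UUID".toList tl = true) := by simp [htl]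
  by_cases hc0 : PySem.Chars.isIn "BOOL".toList tl = true
  · have hm := (pv_mem0 tl).2 hc0
    have hle : r ≤ 0 := pv_foldl_min_le_mem (pvL tl) 7 0 hm
    rw [if_pos (e0.2 hc0)]
    have hr0 : r = 0 := by omega
    rw [hr0]; rfl
  · rw [if_neg (fun h => hc0 (e0.1 h))]
    have hn0 : r ≠ 0 := fun h => hc0 ((pv_mem0 tl).1 (h ▸ hmemor.resolve_left (by omega)))
    by_cases hc1 : (PySem.Chars.isIn "TINYINT".toList tl = true ∨ PySem.Chars.isIn "SMALLINT".toList tl = true ∨ PySem.Chars.isIn "INTEGER".toList tl = true ∨ PySem.Chars.isIn "BIGINT".toList tl = true ∨ PySem.Chars.isIn "HUGEINT".toList tl = true ∨ PySem.Chars.isIn "UBIGINT".toList tl = true ∨ PySem.Chars.isIn "UINTEGER".toList tl = true ∨ PySem.Chars.isIn "USMALLINT".toList tl = true ∨ PySem.Chars.isIn "UTINYINT".toList tl = true)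
    · have hm := (pv_mem1 tl).2 hc1
      have hle : r ≤ 1 := pv_foldl_min_le_mem (pvL tl) 7 1 hm
      rw [if_pos (e1.2 hc1)]
      have hr1 : r = 1 := by omega
      rw [hr1]; rfl
    · rw [if_neg (fun h => hc1 (e1.1 h))]
      have hn1 : r ≠ 1 := fun h => hc1 ((pv_mem1 tl).1 (h ▸ hmemor.resolve_left (by omega)))
      by_cases hc2 : (PySem.Chars.isIn "FLOAT".toList tl = true ∨ PySem.Chars.isIn "DOUBLE".toList tl = true ∨ PySem.Chars.isIn "REAL".toList tl = true ∨ PySem.Chars.isIn "DECIMAL".toList tl = true ∨ PySem.Chars.isIn "NUMERIC".toList tl = true)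
      · have hm := (pv_mem2 tl).2 hc2
        have hle : r ≤ 2 := pv_foldl_min_le_mem (pvL tl) 7 2 hm
        rw [if_pos (e2.2 hc2)]
        have hr2 : r = 2 := by omega
        rw [hr2]; rfl
      · rw [if_neg (fun h => hc2 (e2.1 h))]
        have hn2 : r ≠ 2 := fun h => hc2 ((pv_mem2 tl).1 (h ▸ hmemor.resolve_left (by omega)))
        by_cases hc3 : (PySem.Chars.isIn "DATE".toList tl = true ∨ PySem.Chars.isIn "TIME".toList tl = true ∨ PySem.Chars.isIn "TIMESTAMP".toList tl = true ∨ PySem.Chars.isIn "INTERVAL".toList tl = true)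
        · have hm := (pv_mem3 tl).2 hc3
          have hle : r ≤ 3 := pv_foldl_min_le_mem (pvL tl) 7 3 hm
          rw [if_pos (e3.2 hc3)]
          have hr3 : r = 3 := by omega
          rw [hr3]; rfl
        · rw [if_neg (fun h => hc3 (e3.1 h))]
          have hn3 : r ≠ 3 := fun h => hc3 ((pv_mem3 tl).1 (h ▸ hmemor.resolve_left (by omega)))
          by_cases hc4 : PySem.Chars.isIn "JSON".toList tl = true
          · have hm := (pv_mem4 tl).2 hc4
            have hle : r ≤ 4 := pv_foldl_min_le_mem (pvL tl) 7 4 hm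
            rw [if_pos (e4.2 hc4)]
            have hr4 : r = 4 := by omega
            rw [hr4]; rfl
          · rw [if_neg (fun h => hc4 (e4.1 h))]
            have hn4 : r ≠ 4 := fun h => hc4 ((pv_mem4 tl).1 (h ▸ hmemor.resolve_left (by omega)))
            by_cases hc5 : (PySem.Chars.isIn "BLOB".toList tl = true ∨ PySem.Chars.isIn "BYTEA".toList tl = true ∨ PySem.Chars.isIn "BINARY".toList tl = true ∨ PySem.Chars.isIn "VARBINARY".toList tl = true)
            · have hm := (pv_mem5 tl).2 hc5
              have hle : r ≤ 5 := pv_foldl_min_le_mem (pvL tl) 7 5 hm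
              rw [if_pos (e5.2 hc5)]
              have hr5 : r = 5 := by omega
              rw [hr5]; rfl
            · rw [if_neg (fun h => hc5 (e5.1 h))]
              have hn5 : r ≠ 5 := fun h => hc5 ((pv_mem5 tl).1 (h ▸ hmemor.resolve_left (by omega)))
              by_cases hc6 : (PySem.Chars.isIn "CHAR".toList tl = true ∨ PySem.Chars.isIn "TEXT".toList tl = true ∨ PySem.Chars.isIn "VARCHAR".toList tl = true ∨ PySem.Chars.isIn "UUID".toList tl = true)
              · have hm := (pv_mem6 tl).2 hc6
                have hle : r ≤ 6 := pv_foldl_min_le_mem (pvL tl) 7 6 hm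
                rw [if_pos (e6.2 hc6)]
                have hr6 : r = 6 := by omega
                rw [hr6]; rfl
              · rw [if_neg (fun h => hc6 (e6.1 h))]
                have hn6 : r ≠ 6 := fun h => hc6 ((pv_mem6 tl).1 (h ▸ hmemor.resolve_left (by omega)))
                have hr7 : r = 7 := by
                  rcases hmemor with h7 | hm
                  · exact h7
                  · have := hA hm; omega
                rw [hr7]; rfl
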